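-- pv_equiv track=rewrite | github.com/ma-zal/routeros-cli | mikrotik_telnet.py | _simulate_line
-- ===== SOURCE A (Python) =====
-- def _simulate_line(line: str) -> str:
--     """Simulate terminal \r (carriage return) overwriting within a single line."""
--     buf: list[str] = []
--     col = 0
--     for ch in line:
--         if ch == '\r':
--             col = 0
--         else:
--             if col < len(buf):
--                 buf[col] = ch
--             else:
--                 buf.append(ch)
--             col += 1
--     return "".join(buf)
-- ===== SOURCE B (Python) =====
-- def _simulate_line(line: str) -> str:
--     res = ""
--     for seg in line.split('\r'):
--         res = seg + res[len(seg):]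
--     return res
-- ===== Notes on version B (the rewrite author's own statement) =====
-- stated objective: simpler
-- what changed: Replaces the per-character column-index buffer simulation with a split on carriage returns followed by a left fold in which each segment overwrites the prefix of the accumulated line, the longer tail surviving.
import Mathlib
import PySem

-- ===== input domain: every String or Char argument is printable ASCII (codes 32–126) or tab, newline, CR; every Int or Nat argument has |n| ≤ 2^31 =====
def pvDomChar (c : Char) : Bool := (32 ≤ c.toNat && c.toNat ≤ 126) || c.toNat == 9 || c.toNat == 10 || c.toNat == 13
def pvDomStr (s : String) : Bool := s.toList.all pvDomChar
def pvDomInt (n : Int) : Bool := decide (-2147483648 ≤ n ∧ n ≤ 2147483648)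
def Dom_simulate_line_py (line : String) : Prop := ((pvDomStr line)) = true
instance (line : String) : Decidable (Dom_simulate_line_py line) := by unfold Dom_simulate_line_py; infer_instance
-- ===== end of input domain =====

-- B replaces A's per-character column/buffer simulation with split-on-'\r' plus a
-- prefix-overwrite fold over the segments (objective: simpler).

-- ===== PORT A =====
-- one step of A's loop body: state is (buf, col)
def pvStepA (st : List Char × Nat) (ch : Char) : List Char × Nat :=
  if ch = '\r' then (st.1, 0)
  else (if st.2 < st.1.length then st.1.set st.2 ch else st.1 ++ [ch], st.2 + 1)

def simulate_line_py (line : String) : String :=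
  String.ofList (line.toList.foldl pvStepA ([], 0)).1

-- ===== PORT B =====
-- res = seg + res[len(seg):]; the slice res[k:] with 0 ≤ k = len(seg) is List.drop
-- (exact: PySem.List.slice_from)
def simulate_line_py_alt (line : String) : String :=
  String.ofList ((PySem.Chars.splitOn line.toList ['\r']).foldl
    (fun r s => s ++ r.drop s.length) [])

-- ===== PRECONDITION & SPEC =====
def Spec_simulate_line_py (line : String) (out : String) : Prop := out = simulate_line_py_alt line
instance (line : String) (out : String) : Decidable (Spec_simulate_line_py line out) := by unfold Spec_simulate_line_py; infer_instance

-- ===== CLAIM (what is proved, stated in full; the proofs are below) =====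
def Claim_equal_simulate_line_py : Prop := ∀ (line : String), Dom_simulate_line_py line → Spec_simulate_line_py line (simulate_line_py line)

-- ===== LEMMAS AND PROOFS =====

-- structural form of splitting a char list on '\r' (proof helper)
def pvSplitCR (pre : List Char) : List Char → List (List Char)
  | [] => [pre]
  | c :: rest => if c = '\r' then pre :: pvSplitCR [] rest else pvSplitCR (pre ++ [c]) rest

lemma pvSplitOn_go_eq (l : List Char) : ∀ (fuel : Nat) (cur : List Char) (acc : List (List Char)),
    l.length + 1 ≤ fuel →
    PySem.Chars.splitOn.go ['\r'] fuel l cur acc = acc.reverse ++ pvSplitCR cur.reverse l := by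
  induction l with
  | nil =>
    intro fuel cur acc h
    match fuel with
    | f + 1 => simp [PySem.Chars.splitOn.go, pvSplitCR]
  | cons c rest ih =>
    intro fuel cur acc h
    match fuel with
    | f + 1 =>
      by_cases hc : c = '\r'
      · subst hc
        rw [show PySem.Chars.splitOn.go ['\r'] (f + 1) ('\r' :: rest) cur acc
              = PySem.Chars.splitOn.go ['\r'] f rest [] (cur.reverse :: acc) by
            simp [PySem.Chars.splitOn.go, List.isPrefixOf]]
        rw [ih f [] (cur.reverse :: acc) (by simpa using h)]
        simp [pvSplitCR]
      · rw [show PySem.Chars.splitOn.go ['\r'] (f + 1) (c :: rest) cur acc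
              = PySem.Chars.splitOn.go ['\r'] f rest (c :: cur) acc by
            simp [PySem.Chars.splitOn.go, List.isPrefixOf, Ne.symm hc]]
        rw [ih f (c :: cur) acc (by simpa using h)]
        simp [pvSplitCR, hc]

lemma pvSplitOn_cr (l : List Char) : PySem.Chars.splitOn l ['\r'] = pvSplitCR [] l := by
  unfold PySem.Chars.splitOn
  simpa using pvSplitOn_go_eq l (l.length + 1) [] [] le_rfl

-- A's fold, started in the state reached after writing `pre` over `buf0`, computes
-- B's prefix-overwrite fold over the remaining segments
lemma pvGen (l : List Char) : ∀ (pre buf0 : List Char),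
    (l.foldl pvStepA (pre ++ buf0.drop pre.length, pre.length)).1
      = (pvSplitCR pre l).foldl (fun r s => s ++ r.drop s.length) buf0 := by
  induction l with
  | nil => intro pre buf0; simp [pvSplitCR]
  | cons c rest ih =>
    intro pre buf0
    by_cases hc : c = '\r'
    · subst hc
      have h0 : pvStepA (pre ++ buf0.drop pre.length, pre.length) '\r'
          = (pre ++ buf0.drop pre.length, 0) := by simp [pvStepA]
      rw [List.foldl_cons, h0]
      have := ih [] (pre ++ buf0.drop pre.length)
      simpa [pvSplitCR] using this
    · have hstep : pvStepA (pre ++ buf0.drop pre.length, pre.length) c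
          = ((pre ++ [c]) ++ buf0.drop (pre ++ [c]).length, (pre ++ [c]).length) := by
        simp only [pvStepA, if_neg hc]
        by_cases hlt : pre.length < (pre ++ buf0.drop pre.length).length
        · have hne : buf0.drop pre.length ≠ [] := by
            intro hnil; simp [hnil] at hlt
          rw [if_pos hlt]
          cases hd : buf0.drop pre.length with
          | nil => exact absurd hd hne
          | cons x xs =>
            have hx : xs = buf0.drop (pre.length + 1) := by
              have := congrArg List.tail hd
              simpa [List.tail_drop] using this.symm
            simp [hx, List.append_assoc]
        · have hnil : buf0.drop pre.length = [] := by
            rcases List.eq_nil_or_concat (buf0.drop pre.length) with h | ⟨ys, y, hy⟩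
            · exact h
            · exfalso; apply hlt; simp [hy]
          have hnil' : buf0.drop (pre.length + 1) = [] := by
            have : buf0.length ≤ pre.length := by
              by_contra hgt
              have := List.drop_eq_nil_iff.mp hnil
              omega
            exact List.drop_eq_nil_iff.mpr (by omega)
          rw [if_neg hlt]
          simp [hnil, hnil']
      rw [List.foldl_cons, hstep, ih (pre ++ [c]) buf0]
      simp [pvSplitCR, hc]

-- ===== VERDICT (by name: the statement is the Claim_ definition above) =====
theorem simulate_line_py_spec : Claim_equal_simulate_line_py := by
  intro line _
  unfold Spec_simulate_line_py simulate_line_py simulate_line_py_alt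
  rw [pvSplitOn_cr]
  have := pvGen line.toList [] []
  simpa using congrArg String.ofList this
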